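-- pv_equiv track=rewrite | github.com/GyuCheol/happy_algorithm | 20_07_July/lee_programmers_17683.py | solution
-- ===== SOURCE A (Python) =====
-- def solution(m, musicinfos):
--     l = []
--     sharp_map = {
--         'C': '!',
--         'D': '@',
--         'F': '#',
--         'G': '$',
--         'A': '%',
--         'E': '^',
--         'B': '&'
--     }
--
--     def convert_sharp_sound(s):
--         tmp = []
--
--         for ch in s:
--             if ch == '#':
--                 tmp.append(sharp_map[tmp.pop()])
--             else:
--                 tmp.append(ch)
--
--         return ''.join(tmp)
--
--     def get_minutes(hhmm):
--         h, m = hhmm.split(':')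
--
--         return int(m) + (int(h) * 60)
--
--     m = convert_sharp_sound(m)
--
--     for id, info in enumerate(musicinfos):
--         start, end, title, music = info.split(',')
--
--         # hh:mm > 분 단위로 변환 후 플레이 타임 구하기
--         playtime = get_minutes(end) - get_minutes(start)
--         # playtime과 맞추기 위해 2글자 음을 1글자로 변환
--         music = convert_sharp_sound(music)
--
--
--         if playtime > len(music):
--             full_music = music * (playtime // len(music)) + music[:playtime % len(music)]
--         else:
--             full_music = music[:playtime]
--
--         # 얼핏 들은게 포함되었는가?
--         if m in full_music:
--             # 재생 시간, 순서 추가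
--             # 정렬 기준이 플레이 타임이 긴 > id 순서이기 때문에 음수로 저장
--             l.append((-playtime, id, title))
--
--     return '(None)' if len(l) == 0 else sorted(l)[0][2]
-- ===== SOURCE B (Python) =====
-- def solution(m, musicinfos):
--     sharp = {'C': '!', 'D': '@', 'F': '#', 'G': '$', 'A': '%', 'E': '^', 'B': '&'}
--
--     def norm(s):
--         # one left-to-right pass with lookahead: a note followed by '#' becomes one symbol
--         out = []
--         i = 0
--         while i < len(s):
--             if i + 1 < len(s) and s[i + 1] == '#':
--                 out.append(sharp.get(s[i], s[i]))
--                 i += 2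
--             else:
--                 out.append(s[i])
--                 i += 1
--         return ''.join(out)
--
--     def minutes(t):
--         h, mm = t.split(':')
--         return int(mm) + int(h) * 60
--
--     melody = norm(m)
--     best = None  # (playtime, title); strict '>' keeps the earliest match on ties
--     for info in musicinfos:
--         start, end, title, tune = info.split(',')
--         playtime = minutes(end) - minutes(start)
--         tune = norm(tune)
--         if playtime > len(tune):
--             full = tune * (playtime // len(tune)) + tune[:playtime % len(tune)]
--         else:
--             full = tune[:playtime]
--         if melody in full and (best is None or playtime > best[0]):
--             best = (playtime, title)
--     return '(None)' if best is None else best[1]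
-- ===== Notes on version B (the rewrite author's own statement) =====
-- stated objective: simpler
-- what changed: B keeps a single running best (playtime, title) updated with a strict '>' during the loop instead of A's appending (-playtime, id, title) tuples and sorting the whole list at the end, and replaces A's stack-based sharp conversion (append/pop with a symbol map) by a one-pass lookahead scan that consumes 'X#' pairs directly.
import Mathlib
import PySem

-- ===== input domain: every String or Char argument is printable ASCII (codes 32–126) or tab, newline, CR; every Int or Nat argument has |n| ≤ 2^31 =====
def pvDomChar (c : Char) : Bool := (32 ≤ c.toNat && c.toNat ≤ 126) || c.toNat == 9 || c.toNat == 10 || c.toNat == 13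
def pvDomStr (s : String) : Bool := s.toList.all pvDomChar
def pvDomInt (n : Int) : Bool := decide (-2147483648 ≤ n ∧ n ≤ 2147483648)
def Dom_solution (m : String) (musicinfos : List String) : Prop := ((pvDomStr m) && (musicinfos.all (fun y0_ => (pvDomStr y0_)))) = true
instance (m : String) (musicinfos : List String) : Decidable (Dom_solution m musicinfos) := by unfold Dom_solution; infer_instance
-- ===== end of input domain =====

-- B replaces A's collect-all-matches / sort / take-first pipeline by a single running best
-- (strict '>' keeps the earliest match on ties) and A's stack-based sharp conversion by a
-- one-pass lookahead scan; objective: simpler, same per-track cost.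

-- ===== PORT A =====
-- sharp_map[c] : KeyError = none
def pvSharpA? (c : Char) : Option Char :=
  if c = 'C' then some '!' else if c = 'D' then some '@' else if c = 'F' then some '#'
  else if c = 'G' then some '$' else if c = 'A' then some '%' else if c = 'E' then some '^'
  else if c = 'B' then some '&' else none

-- convert_sharp_sound: tmp is kept reversed (append = cons, pop = head); none = IndexError/KeyError
def pvConvA? (s : List Char) : Option (List Char) :=
  (s.foldl (fun acc ch =>
      acc.bind (fun tmp =>
        if ch = '#' then
          match tmp with
          | [] => none                                   -- tmp.pop() on empty: IndexError
          | t :: ts => (pvSharpA? t).map (fun r => r :: ts)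
        else some (ch :: tmp))) (some [])).map List.reverse

-- get_minutes: none = ValueError (wrong number of ':' fields or non-int piece)
def pvMinutesA? (s : String) : Option Int :=
  match PySem.Str.split? s ":" with
  | some [h, mm] =>
    match PySem.Int.ofStr? h, PySem.Int.ofStr? mm with
    | some hv, some mv => some (mv + hv * 60)
    | _, _ => none
  | _ => none

-- full_music for A (floordiv/mod junk at len = 0 is outside Pre_: Python raises ZeroDivisionError)
def pvFullA (mus : List Char) (p : Int) : List Char :=
  if p > (mus.length : Int) then
    PySem.List.pyRepeat mus (PySem.Int.floordiv p (mus.length : Int)) ++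
      PySem.List.slice mus none (some (PySem.Int.mod p (mus.length : Int)))
  else PySem.List.slice mus none (some p)

-- one iteration of A's loop; the `_ => l` arms are where Python raises (outside Pre_)
def pvStepA (mm : List Char) (l : List (Int × Int × String)) (idinfo : Int × String) :
    List (Int × Int × String) :=
  match PySem.Str.split? idinfo.2 "," with
  | some [st, en, ti, mu] =>
    match pvMinutesA? en, pvMinutesA? st, pvConvA? mu.toList with
    | some e, some s, some mus =>
      let playtime := e - s
      if PySem.Chars.isIn mm (pvFullA mus playtime) then l ++ [(-playtime, idinfo.1, ti)] else l
    | _, _, _ => l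
  | _ => l

def solution (m : String) (musicinfos : List String) : String :=
  let mm := (pvConvA? m.toList).getD []        -- conversion failure = Python raise, outside Pre_
  let l := (PySem.List.enumerate musicinfos).foldl (pvStepA mm) []
  if l.length = 0 then "(None)"
  -- sorted(l) on the triples: the id components are pairwise distinct, so Python's tuple
  -- comparison never reaches the title; sorting by the (-playtime, id) key pair is exact.
  else ((PySem.List.sorted2 l (fun x => x.1) (fun x => x.2.1)).headD (0, 0, "")).2.2

-- ===== PORT B =====
-- sharp.get(c, c)
def pvSharpB (c : Char) : Char :=
  if c = 'C' then '!' else if c = 'D' then '@' else if c = 'F' then '#'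
  else if c = 'G' then '$' else if c = 'A' then '%' else if c = 'E' then '^'
  else if c = 'B' then '&' else c

-- norm: the while-loop with i += 1 / i += 2 as structural recursion consuming 1 or 2 chars
def pvNormB : List Char → List Char
  | [] => []
  | a :: rest =>
    match rest with
    | [] => [a]
    | b :: t => if b = '#' then pvSharpB a :: pvNormB t else a :: pvNormB (b :: t)

def pvMinutesB? (t : String) : Option Int :=
  match PySem.Str.split? t ":" with
  | some [h, mm] =>
    match PySem.Int.ofStr? h, PySem.Int.ofStr? mm with
    | some hv, some mv => some (mv + hv * 60)
    | _, _ => none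
  | _ => none

def pvFullB (tune : List Char) (p : Int) : List Char :=
  if p > (tune.length : Int) then
    PySem.List.pyRepeat tune (PySem.Int.floordiv p (tune.length : Int)) ++
      PySem.List.slice tune none (some (PySem.Int.mod p (tune.length : Int)))
  else PySem.List.slice tune none (some p)

-- one iteration of B's loop over `best`; the `_ => best` arms are where Python raises
def pvStepB (mel : List Char) (best : Option (Int × String)) (info : String) :
    Option (Int × String) :=
  match PySem.Str.split? info "," with
  | some [st, en, ti, mu] =>
    match pvMinutesB? en, pvMinutesB? st with
    | some e, some s =>
      let playtime := e - s
      let tune := pvNormB mu.toList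
      if PySem.Chars.isIn mel (pvFullB tune playtime) &&
          (match best with | none => true | some b => decide (playtime > b.1)) then
        some (playtime, ti)
      else best
    | _, _ => best
  | _ => best

def solution_alt (m : String) (musicinfos : List String) : String :=
  let melody := pvNormB m.toList
  let best := musicinfos.foldl (pvStepB melody) none
  match best with
  | none => "(None)"
  | some b => b.2

-- ===== PRECONDITION & SPEC =====
-- Pre_ excludes exactly the inputs where A raises: a melody/music string whose '#' is not
-- directly preceded by one of CDFGAEB (IndexError/KeyError in convert_sharp_sound), an info
-- without exactly 4 comma fields (unpack ValueError), a time without exactly 2 int ':' fields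
-- (ValueError), and an empty music with positive playtime (ZeroDivisionError).
def pvGoodSharp (s : List Char) : Bool :=
  (s.head? != some '#') && (s.zip s.tail).all (fun p => p.2 != '#' || (pvSharpA? p.1).isSome)

def pvPreInfo (info : String) : Bool :=
  match PySem.Str.split? info "," with
  | some [st, en, _, mu] =>
    (match pvMinutesA? en, pvMinutesA? st with
     | some e, some s => pvGoodSharp mu.toList && (!mu.toList.isEmpty || decide (e - s ≤ 0))
     | _, _ => false)
  | _ => false

def Pre_solution (m : String) (musicinfos : List String) : Prop :=
  (pvGoodSharp m.toList && musicinfos.all pvPreInfo) = true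

instance (m : String) (musicinfos : List String) : Decidable (Pre_solution m musicinfos) := by
  unfold Pre_solution; infer_instance

def pvWitness_solution : String × List String :=
  ("A", ["0:1,0:2,T,AB"])

def Spec_solution (m : String) (musicinfos : List String) (out : String) : Prop :=
  out = solution_alt m musicinfos
instance (m : String) (musicinfos : List String) (out : String) :
    Decidable (Spec_solution m musicinfos out) := by unfold Spec_solution; infer_instance

-- ===== CLAIM (what is proved, stated in full; the proofs are below) =====
def Claim_equal_solution : Prop :=
  ∀ (m : String) (musicinfos : List String), Dom_solution m musicinfos →
    Pre_solution m musicinfos → Spec_solution m musicinfos (solution m musicinfos)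

-- ===== LEMMAS AND PROOFS =====

-- proof-side recursive form of the sharp-validity scan
def pvGoodSharpRec : List Char → Bool
  | [] => true
  | a :: rest =>
    if a = '#' then false
    else match rest with
      | [] => true
      | b :: t => if b = '#' then (pvSharpA? a).isSome && pvGoodSharpRec t else pvGoodSharpRec (b :: t)

theorem pvGoodSharp_eq_rec (s : List Char) : pvGoodSharp s = pvGoodSharpRec s := by
  have hsharp : pvSharpA? '#' = none := rfl
  induction s using pvNormB.induct with
  | case1 => rfl
  | case2 a => by_cases h : a = '#' <;> simp [pvGoodSharp, pvGoodSharpRec, h]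
  | case3 a t ih =>
    by_cases h : a = '#'
    · simp [pvGoodSharp, pvGoodSharpRec, h]
    · rw [pvGoodSharp] at ih ⊢
      rw [pvGoodSharpRec.eq_def]
      cases t with
      | nil => simp [h, pvGoodSharpRec]
      | cons c t' =>
        by_cases hc : c = '#'
        · simp [h, hc, hsharp]
          intro _
          rw [pvGoodSharpRec.eq_def]
          simp
        · simp only [List.zip_cons_cons, List.tail_cons, List.all_cons, List.head?_cons,
            hsharp] at ih ⊢
          have ha : (a == '#') = false := beq_eq_false_iff_ne.mpr h
          have hcb : (c == '#') = false := beq_eq_false_iff_ne.mpr hc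
          simp [bne, ha, hcb] at ih ⊢
          rw [ih]
          simp [h]
  | case4 a b t hb ih =>
    by_cases h : a = '#'
    · simp [pvGoodSharp, pvGoodSharpRec.eq_def, h]
    · rw [pvGoodSharp] at ih ⊢
      rw [pvGoodSharpRec.eq_def]
      simp only [List.zip_cons_cons, List.tail_cons, List.all_cons, List.head?_cons] at ih ⊢
      have ha : (a == '#') = false := beq_eq_false_iff_ne.mpr h
      have hbb : (b == '#') = false := beq_eq_false_iff_ne.mpr hb
      simp [bne, ha, hbb] at ih ⊢
      rw [ih]
      simp [h, hb]

theorem pvSharpA?_eq_sharpB {c d : Char} (h : pvSharpA? c = some d) : pvSharpB c = d := by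
  unfold pvSharpA? at h; unfold pvSharpB
  split_ifs at h ⊢ <;> injection h

theorem pvMinutesA_eq_B (s : String) : pvMinutesA? s = pvMinutesB? s := rfl

theorem pvFullA_eq_B (mus : List Char) (p : Int) : pvFullA mus p = pvFullB mus p := rfl

-- the stack conversion succeeds and agrees with the lookahead scan on pvGoodSharp strings
theorem convA_fold_eq (s : List Char) : pvGoodSharpRec s = true → ∀ tmp : List Char,
    s.foldl (fun acc ch =>
        acc.bind (fun tmp =>
          if ch = '#' then
            match tmp with
            | [] => none
            | t :: ts => (pvSharpA? t).map (fun r => r :: ts)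
          else some (ch :: tmp))) (some tmp) = some ((pvNormB s).reverse ++ tmp) := by
  induction s using pvNormB.induct with
  | case1 => intro _ tmp; simp [pvNormB]
  | case2 a =>
    intro h tmp
    have ha : a ≠ '#' := by
      intro hc; subst hc; simp [pvGoodSharpRec] at h
    simp [pvNormB, ha]
  | case3 a t ih =>
    intro h tmp
    rw [pvGoodSharpRec] at h
    have ha : a ≠ '#' := by intro hc; simp [hc] at h
    simp only [if_neg ha] at h
    simp only [if_true, Bool.and_eq_true] at h
    obtain ⟨h1, h2⟩ := h
    obtain ⟨y, hy⟩ := Option.isSome_iff_exists.mp h1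
    have key := ih h2 (y :: tmp)
    simp [ha, hy, key, pvNormB, pvSharpA?_eq_sharpB hy]
  | case4 a b t hb ih =>
    intro h tmp
    rw [pvGoodSharpRec] at h
    have ha : a ≠ '#' := by intro hc; simp [hc] at h
    simp only [if_neg ha, if_neg hb] at h
    have key := ih h (a :: tmp)
    simp [ha, hb, key, pvNormB]

theorem convA_eq_normB (s : List Char) (h : pvGoodSharp s = true) :
    pvConvA? s = some (pvNormB s) := by
  rw [pvGoodSharp_eq_rec] at h
  unfold pvConvA?
  rw [convA_fold_eq s h []]
  simp

-- the per-track match result, computed once for both proofs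
def pvStep (mel : List Char) (info : String) : Option (Int × String) :=
  match PySem.Str.split? info "," with
  | some [st, en, ti, mu] =>
    match pvMinutesA? en, pvMinutesA? st with
    | some e, some s =>
      if PySem.Chars.isIn mel (pvFullA (pvNormB mu.toList) (e - s)) then some (e - s, ti)
      else none
    | _, _ => none
  | _ => none

theorem stepA_char (mel : List Char) (l : List (Int × Int × String)) (id : Int) (info : String)
    (h : pvPreInfo info = true) :
    pvStepA mel l (id, info) =
      match pvStep mel info with
      | some pt => l ++ [(-pt.1, id, pt.2)]
      | none => l := by
  unfold pvPreInfo at h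
  unfold pvStepA pvStep
  cases hs : PySem.Str.split? info "," with
  | none => simp [hs] at h
  | some parts =>
    rw [hs] at h
    match parts with
    | [st, en, ti, mu] =>
      cases he : pvMinutesA? en <;> cases hst : pvMinutesA? st <;> simp [he, hst] at h ⊢
      have hconv := convA_eq_normB mu.toList h.1
      simp [hconv]
      split <;> simp
    | [] => simp at h
    | [_] => simp at h
    | [_, _] => simp at h
    | [_, _, _] => simp at h
    | _ :: _ :: _ :: _ :: _ :: _ => simp at h

theorem stepB_char (mel : List Char) (best : Option (Int × String)) (info : String)
    (h : pvPreInfo info = true) :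
    pvStepB mel best info =
      match pvStep mel info with
      | some pt =>
        (match best with
         | none => some pt
         | some b => if b.1 < pt.1 then some pt else best)
      | none => best := by
  unfold pvPreInfo at h
  unfold pvStepB pvStep
  cases hs : PySem.Str.split? info "," with
  | none => simp [hs] at h
  | some parts =>
    rw [hs] at h
    match parts with
    | [st, en, ti, mu] =>
      cases he : pvMinutesA? en <;> cases hst : pvMinutesA? st <;>
        simp [← pvMinutesA_eq_B, he, hst] at h ⊢
      rw [← pvFullA_eq_B]
      cases hin : PySem.Chars.isIn mel (pvFullA (pvNormB mu.toList) _) <;>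
        cases best <;> simp
    | [] => simp at h
    | [_] => simp at h
    | [_, _] => simp at h
    | [_, _, _] => simp at h
    | _ :: _ :: _ :: _ :: _ :: _ => simp at h

-- head of the insertion-sort fold = running first-minimum under the comparator
def pvMinStep {α : Type} (bef : α → α → Bool) (h? : Option α) (x : α) : Option α :=
  some (match h? with
        | none => x
        | some h => if bef x h then x else h)

theorem head?_insertBy {α : Type} (bef : α → α → Bool) (x : α) (acc : List α) :
    (PySem.List.insertBy bef x acc).head? = pvMinStep bef acc.head? x := by
  cases acc with
  | nil => simp [PySem.List.insertBy, pvMinStep]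
  | cons y ys =>
    simp only [PySem.List.insertBy, List.head?_cons, pvMinStep]
    split <;> simp_all

theorem head?_foldl_insertBy {α : Type} (bef : α → α → Bool) (l : List α) : ∀ acc : List α,
    (l.foldl (fun acc x => PySem.List.insertBy bef x acc) acc).head? =
      l.foldl (pvMinStep bef) acc.head? := by
  induction l with
  | nil => intro acc; rfl
  | cons x t ih =>
    intro acc
    simp only [List.foldl_cons, ih, head?_insertBy]

-- A's lex comparator on the stored triples
def pvLt (x h : Int × Int × String) : Bool :=
  decide (x.1 < h.1) || (!decide (h.1 < x.1) && decide (x.2.1 < h.2.1))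

def pvRm (l : List (Int × Int × String)) : Option (Int × Int × String) :=
  l.foldl (pvMinStep pvLt) none

theorem head?_sorted2 (l : List (Int × Int × String)) :
    (PySem.List.sorted2 l (fun x => x.1) (fun x => x.2.1)).head? = pvRm l := by
  unfold PySem.List.sorted2 pvRm
  exact head?_foldl_insertBy pvLt l []

-- the invariant tying A's running lex-minimum to B's running best
def pvInv (n : Int) (h? : Option (Int × Int × String)) (best : Option (Int × String)) : Prop :=
  match h?, best with
  | none, none => True
  | some trip, some b => b.1 = -trip.1 ∧ b.2 = trip.2.2 ∧ trip.2.1 < n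
  | _, _ => False

def pvComb (mel : List Char) (h? : Option (Int × Int × String)) (idinfo : Int × String) :
    Option (Int × Int × String) :=
  match pvStep mel idinfo.2 with
  | some pt => pvMinStep pvLt h? (-pt.1, idinfo.1, pt.2)
  | none => h?

theorem inv_step (mel : List Char) (n : Int) (h? : Option (Int × Int × String))
    (best : Option (Int × String)) (info : String) (hp : pvPreInfo info = true)
    (hinv : pvInv n h? best) :
    pvInv (n + 1) (pvComb mel h? (n, info)) (pvStepB mel best info) := by
  rw [stepB_char mel best info hp]
  revert hinv
  have hred : pvComb mel h? (n, info) =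
      (match pvStep mel info with
       | some pt => pvMinStep pvLt h? (-pt.1, n, pt.2)
       | none => h?) := rfl
  rw [hred]
  intro hinv
  cases hstep : pvStep mel info with
  | none =>
    cases h? with
    | none =>
      cases best with
      | none => trivial
      | some b => simp [pvInv] at hinv
    | some trip =>
      cases best with
      | none => simp [pvInv] at hinv
      | some b =>
        simp only [pvInv] at hinv ⊢
        exact ⟨hinv.1, hinv.2.1, by omega⟩
  | some pt =>
    cases h? with
    | none =>
      cases best with
      | none =>
        show pvInv (n + 1) (some (-pt.1, n, pt.2)) (some pt)
        exact ⟨by show pt.1 = -(-pt.1); omega, rfl, by show (n : Int) < n + 1; omega⟩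
      | some b => simp [pvInv] at hinv
    | some trip =>
      cases best with
      | none => simp [pvInv] at hinv
      | some b =>
        simp only [pvInv] at hinv
        obtain ⟨hb1, hb2, hb3⟩ := hinv
        have hlt : pvLt (-pt.1, n, pt.2) trip = decide (b.1 < pt.1) := by
          unfold pvLt
          simp only
          by_cases hc1 : (-pt.1 : Int) < trip.1 <;> by_cases hc2 : trip.1 < -pt.1 <;>
            simp [hc1, hc2] <;> omega
        show pvInv (n + 1)
          (some (if pvLt (-pt.1, n, pt.2) trip then (-pt.1, n, pt.2) else trip))
          (if b.1 < pt.1 then some (pt.1, pt.2) else some b)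
        rw [hlt]
        by_cases hc : b.1 < pt.1
        · rw [if_pos hc, if_pos (by simp [hc])]
          exact ⟨by show pt.1 = -(-pt.1); omega, rfl, by show (n : Int) < n + 1; omega⟩
        · rw [if_neg hc, if_neg (by simp [hc])]
          exact ⟨hb1, hb2, by omega⟩

theorem enumerate_cons {α : Type} (x : α) (t : List α) (n : Int) :
    PySem.List.enumerate (x :: t) n = (n, x) :: PySem.List.enumerate t (n + 1) := rfl

theorem pvRm_append_singleton (l : List (Int × Int × String)) (x : Int × Int × String) :
    pvRm (l ++ [x]) = pvMinStep pvLt (pvRm l) x := by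
  unfold pvRm
  rw [List.foldl_append]
  rfl

theorem pvRm_cons_isSome (t : List (Int × Int × String)) : ∀ h : Int × Int × String,
    ∃ y, t.foldl (pvMinStep pvLt) (some h) = some y := by
  induction t with
  | nil => intro h; exact ⟨h, rfl⟩
  | cons x t ih =>
    intro h
    simp only [List.foldl_cons]
    cases hs : pvMinStep pvLt (some h) x with
    | none => simp [pvMinStep] at hs
    | some y => exact ih y
  
theorem pvRm_eq_none_iff (l : List (Int × Int × String)) : pvRm l = none ↔ l = [] := by
  cases l with
  | nil => simp [pvRm]
  | cons x t =>
    simp only [pvRm, List.foldl_cons]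
    have hx : pvMinStep pvLt none x = some x := rfl
    rw [hx]
    obtain ⟨y, hy⟩ := pvRm_cons_isSome t x
    simp [hy]

-- A's running lex-minimum over the list it builds = the per-track combined fold
theorem rm_foldA (mel : List Char) (infos : List String) : ∀ (n : Int)
    (l : List (Int × Int × String)), infos.all pvPreInfo = true →
    pvRm ((PySem.List.enumerate infos n).foldl (pvStepA mel) l) =
      (PySem.List.enumerate infos n).foldl (pvComb mel) (pvRm l) := by
  induction infos with
  | nil => intro n l _; rfl
  | cons x t ih =>
    intro n l hall
    simp only [List.all_cons, Bool.and_eq_true] at hall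
    rw [enumerate_cons]
    simp only [List.foldl_cons]
    rw [stepA_char mel l n x hall.1]
    cases hstep : pvStep mel x with
    | none =>
      rw [ih (n + 1) l hall.2]
      simp [pvComb, hstep]
    | some pt =>
      rw [ih (n + 1) _ hall.2, pvRm_append_singleton]
      simp [pvComb, hstep, pvMinStep]

theorem inv_fold (mel : List Char) (infos : List String) : ∀ (n : Int)
    (h? : Option (Int × Int × String)) (best : Option (Int × String)),
    infos.all pvPreInfo = true → pvInv n h? best →
    pvInv (n + infos.length)
      ((PySem.List.enumerate infos n).foldl (pvComb mel) h?)
      (infos.foldl (pvStepB mel) best) := by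
  induction infos with
  | nil => intro n h? best _ hinv; simpa using hinv
  | cons x t ih =>
    intro n h? best hall hinv
    simp only [List.all_cons, Bool.and_eq_true] at hall
    rw [enumerate_cons]
    simp only [List.foldl_cons]
    have hstep := inv_step mel n h? best x hall.1 hinv
    have hrec := ih (n + 1) _ _ hall.2 (by simpa [pvComb] using hstep)
    have harith : (n + 1) + (t.length : Int) = n + ((x :: t).length : Int) := by
      simp [List.length_cons]; ring
    rw [harith] at hrec
    exact hrec

-- ===== VERDICT (by name: the statement is the Claim_ definition above) =====
theorem solution_spec : Claim_equal_solution := by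
  intro m infos _ hpre
  unfold Pre_solution at hpre
  simp only [Bool.and_eq_true] at hpre
  obtain ⟨hm, hall⟩ := hpre
  unfold Spec_solution solution solution_alt
  rw [convA_eq_normB m.toList hm]
  simp only [Option.getD_some]
  have hrm := rm_foldA (pvNormB m.toList) infos 0 [] hall
  have hinv := inv_fold (pvNormB m.toList) infos 0 none none hall trivial
  rw [show pvRm [] = none from rfl] at hrm
  rw [← hrm] at hinv
  set l := (PySem.List.enumerate infos 0).foldl (pvStepA (pvNormB m.toList)) [] with hl
  cases hbest : infos.foldl (pvStepB (pvNormB m.toList)) none with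
  | none =>
    rw [hbest] at hinv
    have hnone : pvRm l = none := by
      cases hc : pvRm l with
      | none => rfl
      | some trip => rw [hc] at hinv; simp [pvInv] at hinv
    have : l = [] := (pvRm_eq_none_iff l).mp hnone
    simp [this]
  | some b =>
    rw [hbest] at hinv
    cases hc : pvRm l with
    | none =>
      rw [hc] at hinv; simp [pvInv] at hinv
    | some trip =>
      rw [hc] at hinv
      obtain ⟨_, hb2, _⟩ := hinv
      have hne : l ≠ [] := by
        intro h0
        rw [(pvRm_eq_none_iff l).mpr h0] at hc; cases hc
      have hlen : ¬ l.length = 0 := by simpa [List.length_eq_zero_iff] using hne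
      rw [if_neg hlen]
      have hh : (PySem.List.sorted2 l (fun x => x.1) (fun x => x.2.1)).head? = some trip := by
        rw [head?_sorted2, hc]
      have : (PySem.List.sorted2 l (fun x => x.1) (fun x => x.2.1)).headD (0, 0, "") = trip := by
        rw [List.headD_eq_head?_getD, hh]; rfl
      rw [this, ← hb2]
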